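-- pv_equiv track=rewrite | github.com/gfrovera/aoc2024 | day02/part1.py | evaluate_floor_saftey
-- ===== SOURCE A (Python) =====
-- ResultList = list[list[int]]
--
-- SafteyList = list[bool]
--
-- def evaluate_floor_saftey(input: ResultList) -> SafteyList:
--
--     floor_status =[]
--
--     for idx, lst in enumerate(input):
--         if all(0 < (lst[i] - lst[i-1]) < 4 for i in range(1, len(lst))):
--             floor_safe = True
--         elif all(-4 < (lst[i] - lst[i-1]) < 0 for i in range(1, len(lst))):
--             floor_safe = True
--         else:
--             floor_safe= False
--
--         floor_status.append(floor_safe)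
--
--     return floor_status
-- ===== SOURCE B (Python) =====
-- def evaluate_floor_saftey(input):
--     floor_status = []
--     for lst in input:
--         safe = True
--         direction = None
--         for prev, cur in zip(lst, lst[1:]):
--             d = cur - prev
--             if not (1 <= abs(d) <= 3):
--                 safe = False
--                 break
--             up = d > 0
--             if direction is None:
--                 direction = up
--             elif up != direction:
--                 safe = False
--                 break
--         floor_status.append(safe)
--     return floor_status
-- ===== Notes on version B (the rewrite author's own statement) =====
-- stated objective: alternative
-- what changed: Replaced A's two separate all() scans over index ranges (one for increasing, one for decreasing) by a single pass over adjacent pairs that tracks a direction flag set by the first difference and breaks early on a bad step or direction change.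
import Mathlib
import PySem

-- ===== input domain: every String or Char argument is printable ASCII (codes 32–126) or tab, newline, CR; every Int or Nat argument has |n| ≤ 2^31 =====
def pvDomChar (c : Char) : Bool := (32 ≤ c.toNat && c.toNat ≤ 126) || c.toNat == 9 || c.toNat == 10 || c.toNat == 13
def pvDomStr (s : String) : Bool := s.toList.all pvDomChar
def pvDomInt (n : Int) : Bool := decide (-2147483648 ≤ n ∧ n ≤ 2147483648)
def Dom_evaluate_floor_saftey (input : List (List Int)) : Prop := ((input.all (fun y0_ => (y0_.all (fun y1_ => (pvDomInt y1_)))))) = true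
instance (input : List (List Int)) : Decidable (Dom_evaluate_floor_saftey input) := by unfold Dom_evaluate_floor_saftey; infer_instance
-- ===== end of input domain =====

-- B replaces A's two all() scans over index ranges by one early-exiting pass
-- over adjacent pairs that tracks a direction flag (objective: alternative decomposition).

-- ===== PORT A =====
-- all(0 < (lst[i] - lst[i-1]) < 4 for i in range(1, len(lst))); indices i, i-1 are always
-- in range, so pyGetD's default is never used.
def aInc (lst : List Int) : Bool :=
  (PySem.List.pyRange 1 (PySem.List.len lst) 1).all (fun i =>
    decide (0 < PySem.List.pyGetD lst i 0 - PySem.List.pyGetD lst (i-1) 0 ∧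
            PySem.List.pyGetD lst i 0 - PySem.List.pyGetD lst (i-1) 0 < 4))

-- all(-4 < (lst[i] - lst[i-1]) < 0 for i in range(1, len(lst)))
def aDec (lst : List Int) : Bool :=
  (PySem.List.pyRange 1 (PySem.List.len lst) 1).all (fun i =>
    decide (-4 < PySem.List.pyGetD lst i 0 - PySem.List.pyGetD lst (i-1) 0 ∧
            PySem.List.pyGetD lst i 0 - PySem.List.pyGetD lst (i-1) 0 < 0))

def evaluate_floor_saftey (input : List (List Int)) : List Bool :=
  (PySem.List.enumerate input 0).foldl (fun floor_status p =>
    let lst := p.2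
    let floor_safe := if aInc lst then true else if aDec lst then true else false
    floor_status ++ [floor_safe]) []

-- ===== PORT B =====
-- the inner 'for prev, cur in zip(lst, lst[1:])' loop: dir = direction flag (None until set)
def rowSafeGo (dir : Option Bool) (prev : Int) : List Int → Bool
  | [] => true
  | cur :: rest =>
    let d := cur - prev
    if ¬ (1 ≤ d.natAbs ∧ d.natAbs ≤ 3) then false
    else
      let up : Bool := decide (0 < d)
      match dir with
      | none => rowSafeGo (some up) cur rest
      | some dd => if up != dd then false else rowSafeGo (some dd) cur rest

def rowSafe : List Int → Bool
  | [] => true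
  | x :: rest => rowSafeGo none x rest

def evaluate_floor_saftey_alt (input : List (List Int)) : List Bool :=
  input.map rowSafe

-- ===== PRECONDITION & SPEC =====
def Spec_evaluate_floor_saftey (input : List (List Int)) (out : List Bool) : Prop := out = evaluate_floor_saftey_alt input
instance (input : List (List Int)) (out : List Bool) : Decidable (Spec_evaluate_floor_saftey input out) := by unfold Spec_evaluate_floor_saftey; infer_instance

-- ===== CLAIM (what is proved, stated in full; the proofs are below) =====
def Claim_equal_evaluate_floor_saftey : Prop := ∀ (input : List (List Int)), Dom_evaluate_floor_saftey input → Spec_evaluate_floor_saftey input (evaluate_floor_saftey input)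

-- ===== LEMMAS AND PROOFS =====

def chainP (P : Int → Int → Bool) : Int → List Int → Bool
  | _, [] => true
  | x, y :: r => P x y && chainP P y r

lemma go_some : ∀ (rest : List Int) (x : Int),
    (rowSafeGo (some true) x rest = chainP (fun a b => decide (0 < b - a ∧ b - a < 4)) x rest) ∧
    (rowSafeGo (some false) x rest = chainP (fun a b => decide (-4 < b - a ∧ b - a < 0)) x rest) := by
  intro rest
  induction rest with
  | nil => intro x; simp [rowSafeGo, chainP]
  | cons y r ih =>
      intro x
      constructor
      · show rowSafeGo (some true) x (y :: r) = _
        simp only [rowSafeGo, chainP]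
        by_cases hin : 0 < y - x ∧ y - x < 4
        · have habs : ¬¬(1 ≤ (y - x).natAbs ∧ (y - x).natAbs ≤ 3) := by omega
          rw [if_neg habs, decide_eq_true hin.1, decide_eq_true hin]
          simp only [bne_self_eq_false, Bool.false_eq_true, if_false, Bool.true_and, (ih y).1]
        · by_cases habs : 1 ≤ (y - x).natAbs ∧ (y - x).natAbs ≤ 3
          · have hup : ¬ 0 < y - x := by omega
            rw [if_neg (not_not_intro habs), decide_eq_false hup, decide_eq_false hin]
            simp only [Bool.false_and]
            simp
          · rw [if_pos habs, decide_eq_false hin]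
            simp only [Bool.false_and]
      · show rowSafeGo (some false) x (y :: r) = _
        simp only [rowSafeGo, chainP]
        by_cases hin : -4 < y - x ∧ y - x < 0
        · have habs : ¬¬(1 ≤ (y - x).natAbs ∧ (y - x).natAbs ≤ 3) := by omega
          have hup : ¬ 0 < y - x := by omega
          rw [if_neg habs, decide_eq_false hup, decide_eq_true hin]
          simp only [bne_self_eq_false, Bool.false_eq_true, if_false, Bool.true_and, (ih y).2]
        · by_cases habs : 1 ≤ (y - x).natAbs ∧ (y - x).natAbs ≤ 3
          · have hup : 0 < y - x := by omega
            rw [if_neg (not_not_intro habs), decide_eq_true hup, decide_eq_false hin]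
            simp only [Bool.false_and]
            simp
          · rw [if_pos habs, decide_eq_false hin]
            simp only [Bool.false_and]

lemma go_none (rest : List Int) (x : Int) :
    rowSafeGo none x rest =
      (chainP (fun a b => decide (0 < b - a ∧ b - a < 4)) x rest ||
       chainP (fun a b => decide (-4 < b - a ∧ b - a < 0)) x rest) := by
  cases rest with
  | nil => simp [rowSafeGo, chainP]
  | cons y r =>
      simp only [rowSafeGo, chainP]
      by_cases habs : 1 ≤ (y - x).natAbs ∧ (y - x).natAbs ≤ 3
      · rw [if_neg (not_not_intro habs)]
        by_cases hup : 0 < y - x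
        · have h2 : ¬ (-4 < y - x ∧ y - x < 0) := by omega
          have h1 : (0 < y - x ∧ y - x < 4) := by omega
          rw [decide_eq_true hup, decide_eq_true h1, decide_eq_false h2, (go_some r y).1]
          simp
        · have h1 : ¬ (0 < y - x ∧ y - x < 4) := by omega
          have h2 : (-4 < y - x ∧ y - x < 0) := by omega
          rw [decide_eq_false hup, decide_eq_false h1, decide_eq_true h2, (go_some r y).2]
          simp
      · have h1 : ¬ (0 < y - x ∧ y - x < 4) := by omega
        have h2 : ¬ (-4 < y - x ∧ y - x < 0) := by omega
        rw [if_pos habs, decide_eq_false h1, decide_eq_false h2]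
        simp

lemma all_range_adj (P : Int → Int → Bool) :
    ∀ (rest : List Int) (x : Int),
      (List.range rest.length).all
        (fun k => P ((x :: rest).getD k 0) ((x :: rest).getD (k+1) 0)) = chainP P x rest := by
  intro rest
  induction rest with
  | nil => intro x; simp [chainP]
  | cons y r ih =>
      intro x
      simp only [List.length_cons, List.range_succ_eq_map, List.all_cons, List.all_map,
        List.getD_cons_succ, List.getD_cons_zero, chainP]
      exact congrArg (P x y && ·) (ih y)

lemma pyAll_adj (P : Int → Int → Bool) (x : Int) (rest : List Int) :
    (PySem.List.pyRange 1 (PySem.List.len (x :: rest)) 1).all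
      (fun i => P (PySem.List.pyGetD (x :: rest) (i-1) 0) (PySem.List.pyGetD (x :: rest) i 0))
    = chainP P x rest := by
  rw [PySem.List.len_eq, PySem.List.pyRange_one]
  have hlen : ((((x :: rest).length : Int)) - 1).toNat = rest.length := by
    simp [List.length_cons]
  rw [hlen, List.all_map]
  rw [← all_range_adj P rest x]
  refine List.all_congr rfl (fun k => ?_)
  have h1 : (1 : Int) + (k : Int) - 1 = (k : Int) := by omega
  have h2 : (1 : Int) + (k : Int) = ((k + 1 : Nat) : Int) := by push_cast; omega
  have h3 : ((k + 1 : Nat) : Int) - 1 = ((k : Nat) : Int) := by push_cast; omega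
  simp only [Function.comp, h2, h3, PySem.List.pyGetD_natCast]

lemma aInc_cons (x : Int) (rest : List Int) :
    aInc (x :: rest) = chainP (fun a b => decide (0 < b - a ∧ b - a < 4)) x rest := by
  unfold aInc
  exact pyAll_adj (fun a b => decide (0 < b - a ∧ b - a < 4)) x rest

lemma aDec_cons (x : Int) (rest : List Int) :
    aDec (x :: rest) = chainP (fun a b => decide (-4 < b - a ∧ b - a < 0)) x rest := by
  unfold aDec
  exact pyAll_adj (fun a b => decide (-4 < b - a ∧ b - a < 0)) x rest

lemma row_eq (lst : List Int) :
    (if aInc lst then true else if aDec lst then true else false) = rowSafe lst := by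
  cases lst with
  | nil => simp [aInc, rowSafe, PySem.List.pyRange]
  | cons x rest =>
      rw [aInc_cons, aDec_cons, rowSafe, go_none]
      cases chainP (fun a b => decide (0 < b - a ∧ b - a < 4)) x rest <;>
        cases chainP (fun a b => decide (-4 < b - a ∧ b - a < 0)) x rest <;> simp

-- ===== VERDICT (by name: the statement is the Claim_ definition above) =====
theorem evaluate_floor_saftey_spec : Claim_equal_evaluate_floor_saftey := by
  intro input _
  show evaluate_floor_saftey input = evaluate_floor_saftey_alt input
  unfold evaluate_floor_saftey evaluate_floor_saftey_alt
  rw [PySem.List.foldl_append_singleton_eq_map, List.nil_append]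
  have hcomp : (fun (p : Int × List Int) =>
      if aInc p.2 then true else if aDec p.2 then true else false)
      = ((fun lst => if aInc lst then true else if aDec lst then true else false)
          ∘ (fun p : Int × List Int => p.2)) := rfl
  rw [hcomp, ← List.map_map, PySem.List.map_snd_enumerate]
  exact List.map_congr_left (fun lst _ => row_eq lst)
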